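-- pv_equiv track=rewrite | github.com/josteint/sidfinity | src/gt2_test_pipeline.py | classify_instruments
-- ===== SOURCE A (Python) =====
-- def classify_instruments(gate_timer_col):
--     """Classify instruments into normal/nohr/legato per greloc.c logic.
--     Returns (reorder_map, num_normal, num_nohr, num_legato)."""
--     normals = []
--     nohrs = []
--     legatos = []
--     for i, gt in enumerate(gate_timer_col):
--         if gt & 0x40:
--             legatos.append(i)
--         elif gt & 0x80:
--             nohrs.append(i)
--         else:
--             normals.append(i)
--     # greloc.c order: normals first, then nohr, then legato
--     reorder = normals + nohrs + legatos
--     return reorder, len(normals), len(nohrs), len(legatos)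
-- ===== SOURCE B (Python) =====
-- def classify_instruments(gate_timer_col):
--     """Classify instruments into normal/nohr/legato per greloc.c logic.
--     Returns (reorder_map, num_normal, num_nohr, num_legato)."""
--     codes = [2 if gt & 0x40 else 1 if gt & 0x80 else 0 for gt in gate_timer_col]
--     reorder = sorted(range(len(codes)), key=lambda i: codes[i])
--     return reorder, codes.count(0), codes.count(1), codes.count(2)
-- ===== Notes on version B (the rewrite author's own statement) =====
-- stated objective: alternative
-- what changed: Replaces the three-bucket partition-and-concatenate pass with a code-per-element map followed by a stable sort of the index range keyed by that code, and takes the three counts by counting codes instead of measuring bucket lengths.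
import Mathlib
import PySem

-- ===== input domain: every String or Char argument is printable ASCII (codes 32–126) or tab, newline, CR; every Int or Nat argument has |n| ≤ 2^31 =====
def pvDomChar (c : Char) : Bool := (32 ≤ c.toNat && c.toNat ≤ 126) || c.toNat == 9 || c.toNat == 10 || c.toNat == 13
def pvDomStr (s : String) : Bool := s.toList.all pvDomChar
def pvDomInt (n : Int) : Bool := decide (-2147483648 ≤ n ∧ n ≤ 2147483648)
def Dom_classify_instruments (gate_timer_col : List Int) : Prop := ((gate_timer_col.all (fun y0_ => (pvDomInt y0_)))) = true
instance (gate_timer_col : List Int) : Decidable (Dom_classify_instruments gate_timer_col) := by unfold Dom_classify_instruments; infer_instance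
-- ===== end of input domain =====

-- B replaces A's three-bucket partition pass by a stable sort of the index range keyed by a
-- per-element category code, with the counts taken from the code list (objective: alternative).

-- ===== PORT A =====
-- the loop body of A (append to one of the three buckets, 0x40 checked before 0x80)
def pvStepA (acc : List Int × List Int × List Int) (p : Int × Int) : List Int × List Int × List Int :=
  if PySem.Int.band p.2 64 ≠ 0 then (acc.1, acc.2.1, acc.2.2 ++ [p.1])
  else if PySem.Int.band p.2 128 ≠ 0 then (acc.1, acc.2.1 ++ [p.1], acc.2.2)
  else (acc.1 ++ [p.1], acc.2.1, acc.2.2)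

def classify_instruments (gate_timer_col : List Int) : List Int × Int × Int × Int :=
  let st := (PySem.List.enumerate gate_timer_col 0).foldl pvStepA ([], [], [])
  (st.1 ++ st.2.1 ++ st.2.2, (st.1.length : Int), (st.2.1.length : Int), (st.2.2.length : Int))

-- ===== PORT B =====
-- B's category code: 2 if gt & 0x40 else 1 if gt & 0x80 else 0
def pvCode (gt : Int) : Int :=
  if PySem.Int.band gt 64 ≠ 0 then 2 else if PySem.Int.band gt 128 ≠ 0 then 1 else 0

def classify_instruments_alt (gate_timer_col : List Int) : List Int × Int × Int × Int :=
  let codes := gate_timer_col.map pvCode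
  let reorder := PySem.List.sorted (PySem.List.pyRange 0 (PySem.List.len codes) 1)
    (fun i => PySem.List.pyGetD codes i 0) false
  (reorder, (codes.count 0 : Int), (codes.count 1 : Int), (codes.count 2 : Int))

-- ===== PRECONDITION & SPEC =====
def Spec_classify_instruments (gate_timer_col : List Int) (out : List Int × Int × Int × Int) : Prop := out = classify_instruments_alt gate_timer_col
instance (gate_timer_col : List Int) (out : List Int × Int × Int × Int) : Decidable (Spec_classify_instruments gate_timer_col out) := by unfold Spec_classify_instruments; infer_instance

-- ===== CLAIM (what is proved, stated in full; the proofs are below) =====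
def Claim_equal_classify_instruments : Prop := ∀ (gate_timer_col : List Int), Dom_classify_instruments gate_timer_col → Spec_classify_instruments gate_timer_col (classify_instruments gate_timer_col)

-- ===== LEMMAS AND PROOFS =====

-- pvCode only takes the values 0, 1, 2
theorem pvCode_cases (gt : Int) : pvCode gt = 0 ∨ pvCode gt = 1 ∨ pvCode gt = 2 := by
  unfold pvCode; split_ifs <;> simp

-- A's fold characterised: each bucket collects (in order) the first components of the
-- enumerated pairs whose second component has the corresponding code
theorem foldA_eq (l : List (Int × Int)) (N H L : List Int) :
    l.foldl pvStepA (N, H, L) =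
      (N ++ (l.filter (fun p => pvCode p.2 == 0)).map Prod.fst,
       H ++ (l.filter (fun p => pvCode p.2 == 1)).map Prod.fst,
       L ++ (l.filter (fun p => pvCode p.2 == 2)).map Prod.fst) := by
  induction l generalizing N H L with
  | nil => simp
  | cons x t ih =>
    simp only [List.foldl_cons]
    by_cases h1 : PySem.Int.band x.2 64 = 0
    · by_cases h2 : PySem.Int.band x.2 128 = 0
      · rw [show pvStepA (N, H, L) x = (N ++ [x.1], H, L) from by simp [pvStepA, h1, h2], ih]
        simp [pvCode, h1, h2]
      · rw [show pvStepA (N, H, L) x = (N, H ++ [x.1], L) from by simp [pvStepA, h1, h2], ih]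
        simp [pvCode, h1, h2]
    · rw [show pvStepA (N, H, L) x = (N, H, L ++ [x.1]) from by simp [pvStepA, h1], ih]
      simp [pvCode, h1]

-- insertBy equations (structural; PySem.List.insertBy is transparent)
theorem insertBy_nil {α : Type} (before : α → α → Bool) (x : α) :
    PySem.List.insertBy before x [] = [x] := by
  simp [PySem.List.insertBy]

theorem insertBy_cons {α : Type} (before : α → α → Bool) (x y : α) (ys : List α) :
    PySem.List.insertBy before x (y :: ys) =
      if before x y then x :: y :: ys else y :: PySem.List.insertBy before x ys := by
  simp [PySem.List.insertBy]

-- if x goes before every element, it lands at the front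
theorem insertBy_of_forall_before {α : Type} (before : α → α → Bool) (x : α) (ys : List α)
    (h : ∀ y ∈ ys, before x y = true) : PySem.List.insertBy before x ys = x :: ys := by
  cases ys with
  | nil => simp [insertBy_nil]
  | cons y t => rw [insertBy_cons, if_pos (h y (by simp))]

-- insertion skips a prefix it does not go before
theorem insertBy_append {α : Type} (before : α → α → Bool) (x : α) (p q : List α)
    (h : ∀ y ∈ p, before x y = false) :
    PySem.List.insertBy before x (p ++ q) = p ++ PySem.List.insertBy before x q := by
  induction p with
  | nil => simp
  | cons y t ih =>
    have hy : before x y = false := h y (by simp)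
    simp only [List.cons_append, insertBy_cons, hy]
    simp [ih (fun z hz => h z (by simp [hz]))]

-- the insertion-sort fold over a 3-valued key preserves a three-block partition
theorem foldIns_eq (key : Int → Int) (l A0 A1 A2 : List Int)
    (h0 : ∀ a ∈ A0, key a = 0) (h1 : ∀ a ∈ A1, key a = 1) (h2 : ∀ a ∈ A2, key a = 2)
    (hl : ∀ x ∈ l, key x = 0 ∨ key x = 1 ∨ key x = 2) :
    l.foldl (fun acc x => PySem.List.insertBy (fun a b => decide (key a < key b)) x acc)
        (A0 ++ A1 ++ A2) =
      (A0 ++ l.filter (fun x => key x == 0)) ++ (A1 ++ l.filter (fun x => key x == 1)) ++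
        (A2 ++ l.filter (fun x => key x == 2)) := by
  induction l generalizing A0 A1 A2 with
  | nil => simp
  | cons x t ih =>
    simp only [List.foldl_cons]
    have hx := hl x (by simp)
    have ht : ∀ y ∈ t, key y = 0 ∨ key y = 1 ∨ key y = 2 := fun y hy => hl y (by simp [hy])
    rcases hx with hx | hx | hx
    · -- key x = 0 : insert right after A0
      have e : PySem.List.insertBy (fun a b => decide (key a < key b)) x (A0 ++ A1 ++ A2)
          = (A0 ++ [x]) ++ A1 ++ A2 := by
        rw [List.append_assoc, insertBy_append _ _ _ _
          (fun y hy => by simp [h0 y hy, hx])]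
        rw [insertBy_of_forall_before _ _ _
          (fun y hy => by
            rcases List.mem_append.1 hy with hy | hy
            · simp [h1 y hy, hx]
            · simp [h2 y hy, hx])]
        simp
      rw [e, ih (A0 ++ [x]) A1 A2
        (fun a ha => by rcases List.mem_append.1 ha with ha | ha
                        · exact h0 a ha
                        · simp at ha; simpa [ha] using hx) h1 h2 ht]
      simp [hx]
    · -- key x = 1 : insert right after A1
      have e : PySem.List.insertBy (fun a b => decide (key a < key b)) x (A0 ++ A1 ++ A2)
          = A0 ++ (A1 ++ [x]) ++ A2 := by
        rw [insertBy_append _ _ _ _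
          (fun y hy => by
            rcases List.mem_append.1 hy with hy | hy
            · simp [h0 y hy, hx]
            · simp [h1 y hy, hx])]
        rw [insertBy_of_forall_before _ _ _ (fun y hy => by simp [h2 y hy, hx])]
        simp
      rw [e, ih A0 (A1 ++ [x]) A2 h0
        (fun a ha => by rcases List.mem_append.1 ha with ha | ha
                        · exact h1 a ha
                        · simp at ha; simpa [ha] using hx) h2 ht]
      simp [hx]
    · -- key x = 2 : append at the very end
      have e : PySem.List.insertBy (fun a b => decide (key a < key b)) x (A0 ++ A1 ++ A2)
          = A0 ++ A1 ++ (A2 ++ [x]) := by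
        rw [PySem.List.insertBy_of_forall_not_before _ _ _
          (fun y hy => by
            rcases List.mem_append.1 hy with hy | hy
            · rcases List.mem_append.1 hy with hy | hy
              · simp [h0 y hy, hx]
              · simp [h1 y hy, hx]
            · simp [h2 y hy, hx])]
        simp
      rw [e, ih A0 A1 (A2 ++ [x]) h0 h1
        (fun a ha => by rcases List.mem_append.1 ha with ha | ha
                        · exact h2 a ha
                        · simp at ha; simpa [ha] using hx) ht]
      simp [hx]

-- B's sort characterised: sorting the index range by a 3-valued key concatenates the
-- three filtered sublists in key order
theorem sorted_three (key : Int → Int) (l : List Int)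
    (hl : ∀ x ∈ l, key x = 0 ∨ key x = 1 ∨ key x = 2) :
    PySem.List.sorted l key false =
      l.filter (fun x => key x == 0) ++ l.filter (fun x => key x == 1) ++
        l.filter (fun x => key x == 2) := by
  rw [PySem.List.sorted_eq_foldl_insertBy]
  simpa using foldIns_eq key l [] [] [] (by simp) (by simp) (by simp) hl

-- the key B uses agrees with pvCode of the original element on in-range indices
theorem key_eq_code (xs : List Int) (j : Int) (hj : 0 ≤ j) (hj' : j < (xs.length : Int)) :
    PySem.List.pyGetD (xs.map pvCode) j 0 = pvCode (PySem.List.pyGetD xs j 0) := by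
  rw [PySem.List.pyGetD_eq_getElem (xs.map pvCode) (0 : Int) hj (by simpa using hj'),
      PySem.List.pyGetD_eq_getElem xs (0 : Int) hj hj']
  simp

-- count in the code list = countP of the code over the original list
theorem count_code (xs : List Int) (c : Int) :
    (xs.map pvCode).count c = xs.countP (fun gt => pvCode gt == c) := by
  rw [List.count_eq_countP, List.countP_map]
  rfl

-- filtered enumerate projected to indices = filtered index range
theorem filter_enumerate_eq (xs : List Int) (c : Int) :
    ((PySem.List.enumerate xs 0).filter (fun p => pvCode p.2 == c)).map Prod.fst =
      (PySem.List.pyRange 0 (PySem.List.len xs) 1).filter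
        (fun j => pvCode (PySem.List.pyGetD xs j 0) == c) := by
  rw [PySem.List.enumerate_eq_map_pyRange (d := 0), List.filter_map, List.map_map]
  simp [Function.comp_def]

-- ===== VERDICT (by name: the statement is the Claim_ definition above) =====
theorem classify_instruments_spec : Claim_equal_classify_instruments := by
  intro xs _
  unfold Spec_classify_instruments classify_instruments classify_instruments_alt
  simp only []
  rw [foldA_eq]
  have hkey : ∀ j ∈ PySem.List.pyRange 0 (PySem.List.len (xs.map pvCode)) 1,
      PySem.List.pyGetD (xs.map pvCode) j 0 = pvCode (PySem.List.pyGetD xs j 0) := by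
    intro j hj
    rw [PySem.List.mem_pyRange_one] at hj
    exact key_eq_code xs j hj.1 (by simpa [PySem.List.len_eq] using hj.2)
  have hsort : PySem.List.sorted (PySem.List.pyRange 0 (PySem.List.len (xs.map pvCode)) 1)
      (fun i => PySem.List.pyGetD (xs.map pvCode) i 0) false =
      (PySem.List.pyRange 0 (PySem.List.len xs) 1).filter
          (fun j => pvCode (PySem.List.pyGetD xs j 0) == 0) ++
      (PySem.List.pyRange 0 (PySem.List.len xs) 1).filter
          (fun j => pvCode (PySem.List.pyGetD xs j 0) == 1) ++
      (PySem.List.pyRange 0 (PySem.List.len xs) 1).filter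
          (fun j => pvCode (PySem.List.pyGetD xs j 0) == 2) := by
    rw [sorted_three _ _ (fun x hx => by rw [hkey x hx]; exact pvCode_cases _)]
    have hlen : PySem.List.len (xs.map pvCode) = PySem.List.len xs := by
      simp [PySem.List.len_eq]
    rw [hlen]
    refine congrArg₂ (· ++ ·) (congrArg₂ (· ++ ·) ?_ ?_) ?_ <;>
      exact List.filter_congr (fun j hj => by rw [hkey j (by simpa [PySem.List.len_eq] using hj)])
  simp only [PySem.List.len_eq, List.length_map] at hsort
  have hcount : ∀ c : Int,
      (PySem.List.pyRange 0 ((xs.length : Int)) 1).countP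
        (fun j => pvCode (PySem.List.pyGetD xs j 0) == c) =
      xs.countP (fun gt => pvCode gt == c) := by
    intro c
    conv_rhs => rw [← PySem.List.map_pyGetD_pyRange_zero' xs 0]
    rw [List.countP_map]
    rfl
  refine Prod.ext ?_ (Prod.ext ?_ (Prod.ext ?_ ?_)) <;>
    simp [hsort, filter_enumerate_eq, count_code, hcount, PySem.List.len_eq,
      ← List.countP_eq_length_filter, List.append_assoc]
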